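-- pv_equiv track=rewrite | github.com/Alberto-SC/Reference | Reference/tex/preprocessor.py | ordoescape
-- ===== SOURCE A (Python) =====
-- def escape(input):
--     input = input.replace('<', r'\ensuremath{<}')
--     input = input.replace('>', r'\ensuremath{>}')
--     return input
--
-- def ordoescape(input, esc=True):
--     if esc:
--         input = escape(input)
--     start = input.find("O(")
--     if start >= 0:
--         bracketcount = 1
--         end = start+1
--         while end+1<len(input) and bracketcount>0:
--             end = end + 1
--             if input[end] == '(':
--                 bracketcount = bracketcount + 1
--             elif input[end] == ')':
--                 bracketcount = bracketcount - 1
--         if bracketcount == 0: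
--             return r"%s\bigo{%s}%s" % (input[:start], input[start+2:end], ordoescape(input[end+1:], False))
--     return input
-- ===== SOURCE B (Python) =====
-- def escape(input):
--     input = input.replace('<', r'\ensuremath{<}')
--     input = input.replace('>', r'\ensuremath{>}')
--     return input
--
-- def ordoescape(input, esc=True):
--     # Single-pass character state machine: no find(), no slicing; scans each
--     # character once, collecting the O(...) body while counting depth.
--     if esc:
--         input = escape(input)
--     out = []
--     mid = None        # None = normal mode; list = inside an O( ... ) group
--     depth = 0
--     i = 0
--     n = len(input)
--     while i < n:
--         c = input[i]
--         if mid is None: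
--             if c == 'O' and i + 1 < n and input[i + 1] == '(':
--                 mid = []
--                 depth = 1
--                 i += 2
--                 continue
--             out.append(c)
--         elif c == '(':
--             depth += 1
--             mid.append(c)
--         elif c == ')':
--             depth -= 1
--             if depth == 0:
--                 out.append('\\bigo{' + ''.join(mid) + '}')
--                 mid = None
--             else:
--                 mid.append(c)
--         else:
--             mid.append(c)
--         i += 1
--     if mid is not None:
--         out.append('O(' + ''.join(mid))
--     return ''.join(out)
-- ===== Notes on version B (the rewrite author's own statement) =====
-- stated objective: alternative
-- what changed: Replaced A's find-next-marker-then-rescan recursion (recursive %-format rebuilding with string slicing) by a single left-to-right character state machine that threads an accumulator of chunks and an open-group buffer with a depth counter, emitting the replacement markup when the depth returns to zero.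
import Mathlib
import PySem

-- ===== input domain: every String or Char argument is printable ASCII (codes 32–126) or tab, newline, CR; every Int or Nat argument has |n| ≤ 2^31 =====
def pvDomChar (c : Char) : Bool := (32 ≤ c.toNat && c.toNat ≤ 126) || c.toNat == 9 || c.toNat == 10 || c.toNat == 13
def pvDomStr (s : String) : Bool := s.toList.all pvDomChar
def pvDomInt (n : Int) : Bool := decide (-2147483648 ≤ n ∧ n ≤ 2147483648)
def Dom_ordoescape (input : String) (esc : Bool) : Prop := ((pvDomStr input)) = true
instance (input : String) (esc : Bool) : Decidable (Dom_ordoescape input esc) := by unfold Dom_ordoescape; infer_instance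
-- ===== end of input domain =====

-- B replaces A's find-then-rescan recursion by a single-pass character state machine
-- (objective: alternative decomposition, same cost).
-- A's loops are totalized with a fuel argument; the initial (length-derived) fuel provably
-- exceeds the iteration count, so the exhaustion branch is never taken and the port computes
-- exactly what the Python computes.

-- ===== PORT A =====
-- shared helper: Python 'escape' (both Pythons call it identically)
def escPy (cs : List Char) : List Char :=
  PySem.Chars.replace (PySem.Chars.replace cs ['<'] ("\\ensuremath{<}".toList)) ['>'] ("\\ensuremath{>}".toList)

-- A's inner while loop: 'while end+1<len(input) and bracketcount>0: …'; input[end] is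
-- in range under the loop guard, so the guarded getElem is exact for Python indexing.
def scanA (cs : List Char) (fuel : Nat) (en : Nat) (bc : Int) : Nat × Int :=
  match fuel with
  | 0 => (en, bc)
  | fuel + 1 =>
    if h : en + 1 < cs.length ∧ bc > 0 then
      let c := cs[en + 1]'h.1
      scanA cs fuel (en + 1) (if c == '(' then bc + 1 else if c == ')' then bc - 1 else bc)
    else (en, bc)

def ordoCore (fuel : Nat) (cs : List Char) : List Char :=
  match fuel with
  | 0 => cs
  | fuel + 1 =>
    let start := PySem.Chars.find cs ("O(".toList)
    if 0 ≤ start then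
      let r := scanA cs cs.length (start.toNat + 1) 1
      if r.2 = 0 then
        PySem.Chars.slice cs none (some start) ++ "\\bigo{".toList
          ++ PySem.Chars.slice cs (some (start + 2)) (some (r.1 : Int)) ++ "}".toList
          ++ ordoCore fuel (PySem.Chars.slice cs (some ((r.1 : Int) + 1)) none)
      else cs
    else cs

def ordoescape (input : String) (esc : Bool) : String :=
  let cs := if esc then escPy input.toList else input.toList
  String.ofList (ordoCore (cs.length + 1) cs)

-- ===== PORT B =====
-- Source B's while loop over i: structural recursion on the remaining characters, threading the
-- state (out = collected chunks, mid = None | body of the open O( group, depth).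
-- the two-character lookahead test is 'c = 'O' ∧ rest.head? = some '(''.
def loopB : List Char → List (List Char) → Option (List Char) → Int → List Char
  | [], out, mid, _ =>
    (out ++ (match mid with | none => [] | some m => ['O' :: '(' :: m])).flatten
  | c :: rest, out, mid, depth =>
    match mid with
    | none =>
      if c = 'O' ∧ rest.head? = some '(' then loopB rest.tail out (some []) 1
      else loopB rest (out ++ [[c]]) none depth
    | some m =>
      if c = '(' then loopB rest out (some (m ++ [c])) (depth + 1)
      else if c = ')' then
        if depth - 1 = 0 then loopB rest (out ++ ["\\bigo{".toList ++ m ++ ['}']]) none (depth - 1)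
        else loopB rest out (some (m ++ [c])) (depth - 1)
      else loopB rest out (some (m ++ [c])) depth
termination_by cs _ _ _ => cs.length
decreasing_by all_goals (simp [List.length_tail]; try omega)

def ordoescape_alt (input : String) (esc : Bool) : String :=
  let cs := if esc then escPy input.toList else input.toList
  String.ofList (loopB cs [] none 0)

-- ===== PRECONDITION & SPEC =====
def Spec_ordoescape (input : String) (esc : Bool) (out : String) : Prop := out = ordoescape_alt input esc
instance (input : String) (esc : Bool) (out : String) : Decidable (Spec_ordoescape input esc out) := by unfold Spec_ordoescape; infer_instance

-- ===== CLAIM (what is proved, stated in full; the proofs are below) =====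
def Claim_equal_ordoescape : Prop := ∀ (input : String) (esc : Bool), Dom_ordoescape input esc → Spec_ordoescape input esc (ordoescape input esc)

-- ===== LEMMAS AND PROOFS =====

-- abstract bracket scanner (proof-side only): consumed count and final depth
def scanL : List Char → Int → Nat × Int
  | [], d => (0, d)
  | c :: rest, d =>
    if d ≤ 0 then (0, d)
    else
      let r := scanL rest (if c = '(' then d + 1 else if c = ')' then d - 1 else d)
      (r.1 + 1, r.2)

theorem scanL_zero (q : List Char) : scanL q 0 = (0, 0) := by
  cases q <;> simp [scanL]

theorem scanL_le (q : List Char) : ∀ d, (scanL q d).1 ≤ q.length := by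
  induction q with
  | nil => intro d; simp [scanL]
  | cons c rest ih =>
    intro d
    simp only [scanL]
    split
    · simp
    · simpa using Nat.succ_le_succ (ih _)

theorem scanL_pos (q : List Char) (d : Int) (hd : 0 < d) (h0 : (scanL q d).2 = 0) :
    1 ≤ (scanL q d).1 := by
  cases q with
  | nil => simp [scanL] at h0; omega
  | cons c rest =>
    rw [scanL, if_neg (show ¬ d ≤ 0 by omega)]
    simp

-- A's index-based inner loop computes scanL on the suffix after position en
theorem scanA_eq_scanL (cs : List Char) :
    ∀ (fuel : Nat) (en : Nat) (bc : Int), cs.length ≤ en + 1 + fuel →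
    scanA cs fuel en bc =
      (en + (scanL (cs.drop (en + 1)) bc).1, (scanL (cs.drop (en + 1)) bc).2) := by
  intro fuel
  induction fuel with
  | zero =>
    intro en bc hle
    have : cs.drop (en + 1) = [] := List.drop_eq_nil_of_le (by omega)
    simp [scanA, this, scanL]
  | succ fuel ih =>
    intro en bc hle
    rw [scanA]
    by_cases h : en + 1 < cs.length ∧ bc > 0
    · rw [dif_pos h]
      have hdrop : cs.drop (en + 1) = cs[en + 1]'h.1 :: cs.drop (en + 2) := by
        rw [List.drop_eq_getElem_cons h.1]
      rw [ih (en + 1) _ (by omega)]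
      have h12 : en + 1 + 1 = en + 2 := rfl
      rw [h12, hdrop, scanL]
      rw [if_neg (show ¬ bc ≤ 0 by omega)]
      simp only [beq_iff_eq, Prod.mk.injEq]
      exact ⟨by omega, trivial⟩
    · rw [dif_neg h]
      rcases (not_and_or.mp h) with h1 | h2
      · have : cs.drop (en + 1) = [] := List.drop_eq_nil_of_le (by omega)
        simp [this, scanL]
      · have hbc : bc ≤ 0 := by omega
        cases hq : cs.drop (en + 1) with
        | nil => simp [scanL]
        | cons x xs => simp [scanL, if_pos hbc]

-- flushing the accumulator of B's loop
theorem loopB_flush (n : Nat) : ∀ (q : List Char), q.length = n →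
    ∀ (out : List (List Char)) (mid : Option (List Char)) (d : Int),
    loopB q out mid d = out.flatten ++ loopB q [] mid d := by
  induction n using Nat.strong_induction_on with
  | _ n IH =>
    intro q hq out mid d
    cases q with
    | nil => cases mid <;> simp [loopB]
    | cons c rest =>
      subst hq
      have hlt : rest.length < (c :: rest).length := by simp
      have hlt2 : rest.tail.length < (c :: rest).length := by
        simp only [List.length_tail, List.length_cons]; omega
      cases mid with
      | none =>
        rw [loopB, loopB]
        simp only [List.nil_append]
        by_cases h : c = 'O' ∧ rest.head? = some '('
        · simp only [if_pos h]
          exact IH rest.tail.length hlt2 rest.tail rfl out _ _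
        · simp only [if_neg h]
          rw [IH rest.length hlt rest rfl (out ++ [[c]]),
              IH rest.length hlt rest rfl [[c]]]
          simp
      | some m =>
        rw [loopB, loopB]
        simp only [List.nil_append]
        by_cases h1 : c = '('
        · simp only [if_pos h1]
          exact IH rest.length hlt rest rfl out _ _
        · simp only [if_neg h1]
          by_cases h2 : c = ')'
          · simp only [if_pos h2]
            by_cases h3 : d - 1 = 0
            · simp only [if_pos h3]
              rw [IH rest.length hlt rest rfl (out ++ _),
                  IH rest.length hlt rest rfl [_]]
              simp
            · simp only [if_neg h3]
              exact IH rest.length hlt rest rfl out _ _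
          · simp only [if_neg h2]
            exact IH rest.length hlt rest rfl out _ _

-- B inside an open group: it computes exactly the scanL split
theorem loopB_inside : ∀ (q : List Char) (m : List Char) (d : Int), 0 < d →
    loopB q [] (some m) d =
      if (scanL q d).2 = 0 then
        "\\bigo{".toList ++ m ++ q.take ((scanL q d).1 - 1)
          ++ '}' :: loopB (q.drop ((scanL q d).1)) [] none 0
      else 'O' :: '(' :: (m ++ q) := by
  intro q
  induction q with
  | nil =>
    intro m d hd
    simp [loopB, scanL]
    omega
  | cons c rest ih =>
    intro m d hd
    rw [loopB]
    simp only [scanL, if_neg (show ¬ d ≤ 0 by omega)]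
    by_cases h1 : c = '('
    · subst h1
      simp only [reduceIte]
      rw [ih _ (d + 1) (by omega)]
      by_cases h0 : (scanL rest (d + 1)).2 = 0
      · have h1le := scanL_pos rest (d + 1) (by omega) h0
        simp only [if_pos h0]
        rw [(show (scanL rest (d + 1)).1 + 1 - 1 = ((scanL rest (d + 1)).1 - 1) + 1 by omega),
            List.take_succ_cons, List.drop_succ_cons]
        simp
      · simp only [if_neg h0]
        simp
    · by_cases h2 : c = ')'
      · subst h2
        simp only [if_neg (show ¬ ((')':Char) = '(') by decide), if_pos trivial]
        by_cases h3 : d = 1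
        · subst h3
          rw [if_pos (show (1:Int) - 1 = 0 from rfl)]
          rw [(show (1:Int) - 1 = 0 from rfl), scanL_zero]
          rw [loopB_flush _ rest rfl]
          simp
        · rw [if_neg (show ¬ d - 1 = 0 by omega)]
          rw [ih _ (d - 1) (by omega)]
          by_cases h0 : (scanL rest (d - 1)).2 = 0
          · have h1le := scanL_pos rest (d - 1) (by omega) h0
            simp only [if_pos h0]
            rw [(show (scanL rest (d - 1)).1 + 1 - 1 = ((scanL rest (d - 1)).1 - 1) + 1 by omega),
                List.take_succ_cons, List.drop_succ_cons]
            simp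
          · simp only [if_neg h0]
            simp
      · simp only [if_neg h1, if_neg h2]
        rw [ih _ d hd]
        by_cases h0 : (scanL rest d).2 = 0
        · have h1le := scanL_pos rest d hd h0
          simp only [if_pos h0]
          rw [(show (scanL rest d).1 + 1 - 1 = ((scanL rest d).1 - 1) + 1 by omega),
              List.take_succ_cons, List.drop_succ_cons]
          simp
        · simp only [if_neg h0]
          simp

-- B in normal mode copies a string with no occurrence of the marker unchanged
theorem loopB_no_occ : ∀ (q : List Char), ¬ (['O', '('] <:+: q) → loopB q [] none 0 = q := by
  intro q
  induction q with
  | nil => intro _; simp [loopB]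
  | cons c rest ih =>
    intro hno
    rw [loopB]
    have hcond : ¬ (c = 'O' ∧ rest.head? = some '(') := by
      rintro ⟨rfl, hhd⟩
      cases rest with
      | nil => simp at hhd
      | cons r rest2 =>
        simp at hhd
        subst hhd
        exact hno ⟨[], rest2, rfl⟩
    rw [if_neg hcond, loopB_flush _ rest rfl]
    have : ¬ (['O', '('] <:+: rest) := fun h => hno (h.trans (List.suffix_cons c rest).isInfix)
    rw [ih this]
    simp

-- B in normal mode walks past a prefix containing no occurrence of the marker
theorem loopB_prefix : ∀ (p q : List Char),
    (∀ i, i < p.length → ¬ (['O', '('] <+: (p ++ 'O' :: '(' :: q).drop i)) →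
    loopB (p ++ 'O' :: '(' :: q) [] none 0 = p ++ loopB q [] (some []) 1 := by
  intro p
  induction p with
  | nil =>
    intro q _
    rw [List.nil_append, loopB]
    simp
  | cons a p' ih =>
    intro q hp
    rw [List.cons_append, loopB]
    have hcond : ¬ (a = 'O' ∧ (p' ++ 'O' :: '(' :: q).head? = some '(') := by
      rintro ⟨rfl, hhd⟩
      cases hw : p' ++ 'O' :: '(' :: q with
      | nil => rw [hw] at hhd; simp at hhd
      | cons w ws =>
        rw [hw] at hhd; simp at hhd
        subst hhd
        refine hp 0 (by simp) ?_
        rw [List.drop_zero, List.cons_append, hw]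
        exact ⟨ws, rfl⟩
    rw [if_neg hcond, loopB_flush _ (p' ++ 'O' :: '(' :: q) rfl]
    rw [ih q (fun i hi => by simpa using hp (i + 1) (by simpa using Nat.succ_lt_succ hi))]
    simp

-- main equivalence of the two cores, by strong induction on the length
theorem core_eq (n : Nat) : ∀ (cs : List Char) (fuel : Nat), cs.length = n → n < fuel →
    ordoCore fuel cs = loopB cs [] none 0 := by
  induction n using Nat.strong_induction_on with
  | _ n IH =>
    intro cs fuel hlen hfuel
    obtain ⟨f, rfl⟩ : ∃ f, fuel = f + 1 := ⟨fuel - 1, by omega⟩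
    rw [ordoCore]
    by_cases hfind : 0 ≤ PySem.Chars.find cs ("O(".toList)
    · -- there is an occurrence
      set s := PySem.Chars.find cs ("O(".toList) with hs
      have hspec := PySem.Chars.find_spec (s := cs) (sub := "O(".toList) hfind
      obtain ⟨⟨t, ht⟩, hmin⟩ := hspec
      set k := s.toNat with hk
      have hOl : ("O(".toList) = ['O', '('] := by decide
      rw [hOl] at ht
      have hdec : cs = cs.take k ++ 'O' :: '(' :: t := by
        conv_lhs => rw [← List.take_append_drop k cs]
        rw [← ht]
        simp
      have hkle : k ≤ cs.length := by
        have := PySem.Chars.find_le_length cs ("O(".toList)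
        omega
      have htlen : cs.length = k + 2 + t.length := by
        have h := congrArg List.length ht
        simp [List.length_drop] at h
        omega
      have hdropk2 : cs.drop (k + 2) = t := by
        have h2 : (cs.drop k).drop 2 = cs.drop (k + 2) := by
          rw [List.drop_drop]
        rw [← h2, ← ht]
        rfl
      -- A's inner scan in terms of scanL on t
      have hscan : scanA cs cs.length (k + 1) 1
          = (k + 1 + (scanL t 1).1, (scanL t 1).2) := by
        rw [scanA_eq_scanL cs cs.length (k + 1) 1 (by omega)]
        rw [(by omega : k + 1 + 1 = k + 2), hdropk2]
      rw [if_pos hfind]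
      simp only [hscan]
      -- B side
      have hB : loopB cs [] none 0 = cs.take k ++ loopB t [] (some []) 1 := by
        conv_lhs => rw [hdec]
        refine loopB_prefix (cs.take k) t ?_
        intro i hi hpre
        rw [← hdec] at hpre
        refine hmin i (by simp [List.length_take] at hi; omega) ?_
        rw [hOl]; exact hpre
      rw [hB, loopB_inside t [] 1 (by omega)]
      have hL := scanL_le t 1
      by_cases h0 : (scanL t 1).2 = 0
      · have h1le := scanL_pos t 1 (by omega) h0
        rw [if_pos h0, if_pos h0]
        -- slices
        have hsl1 : PySem.Chars.slice cs none (some s) = cs.take k := by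
          rw [(show PySem.Chars.slice cs none (some s) = PySem.List.slice cs none (some s) from rfl), PySem.List.slice_to _ hfind]
        have hsl2 : PySem.Chars.slice cs (some (s + 2)) (some ((k + 1 + (scanL t 1).1 : Nat) : Int))
            = t.take ((scanL t 1).1 - 1) := by
          rw [(show PySem.Chars.slice cs (some (s+2)) (some ((k + 1 + (scanL t 1).1 : Nat) : Int)) = PySem.List.slice cs (some (s+2)) (some ((k + 1 + (scanL t 1).1 : Nat) : Int)) from rfl), PySem.List.slice_toNat _ (by omega) (by positivity)]
          have h1 : (s + 2).toNat = k + 2 := by omega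
          have h2 : ((k + 1 + (scanL t 1).1 : Nat) : Int).toNat = k + 1 + (scanL t 1).1 := by omega
          rw [h1, h2, hdropk2]
          congr 1
          omega
        have hsl3 : PySem.Chars.slice cs (some (((k + 1 + (scanL t 1).1 : Nat) : Int) + 1)) none
            = t.drop ((scanL t 1).1) := by
          rw [(by push_cast; ring : ((k + 1 + (scanL t 1).1 : Nat) : Int) + 1
              = ((k + 2 + (scanL t 1).1 : Nat) : Int))]
          rw [(show PySem.Chars.slice cs (some (((k + 2 + (scanL t 1).1 : Nat) : Int))) none = PySem.List.slice cs (some (((k + 2 + (scanL t 1).1 : Nat) : Int))) none from rfl), PySem.List.slice_from_natCast]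
          rw [← hdropk2, List.drop_drop]
        rw [hsl1, hsl2, hsl3]
        -- recursion / IH
        have hrec : ordoCore f (t.drop ((scanL t 1).1)) = loopB (t.drop ((scanL t 1).1)) [] none 0 := by
          refine IH (t.drop ((scanL t 1).1)).length ?_ _ f rfl ?_
          · simp [List.length_drop]; omega
          · simp [List.length_drop]; omega
        rw [hrec]
        simp [List.append_assoc]
      · rw [if_neg h0, if_neg h0]
        conv_lhs => rw [hdec]
        simp
    · -- no occurrence
      rw [if_neg hfind]
      have hneg : PySem.Chars.find cs ("O(".toList) = -1 := by
        have := PySem.Chars.neg_one_le_find cs ("O(".toList)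
        omega
      have hno : ¬ (("O(".toList) <:+: cs) := (PySem.Chars.find_eq_neg_one_iff cs _).mp hneg
      rw [loopB_no_occ cs (by simpa using hno)]

-- ===== VERDICT (by name: the statement is the Claim_ definition above) =====
theorem ordoescape_spec : Claim_equal_ordoescape := by
  intro input esc _
  unfold Spec_ordoescape ordoescape ordoescape_alt
  dsimp only
  rw [core_eq _ _ _ rfl (by omega)]
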